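-- pv_equiv track=rewrite | github.com/donglam1824/Project2 | waypoint_gpt.py | find_points
-- ===== SOURCE A (Python) =====
-- def find_points(map_data):
--     # Always start from the top-left corner (0, 0)
--     start = (0, 0)
--     end = None
--     for i, row in enumerate(map_data):
--         for j, val in enumerate(row):
--             if val == '#':
--                 end = (i, j)
--     return start, end
-- ===== SOURCE B (Python) =====
-- def find_points(map_data):
--     # Start is fixed; the last '#' in row-major order is the first '#'
--     # met when scanning the grid backwards, so return on the first hit.
--     for i, row in reversed(list(enumerate(map_data))):
--         for j, val in reversed(list(enumerate(row))):
--             if val == '#':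
--                 return (0, 0), (i, j)
--     return (0, 0), None
-- ===== Notes on version B (the rewrite author's own statement) =====
-- stated objective: alternative
-- what changed: Replaces A's full two-pass overwrite scan (keeping the last '#' seen) by a backward scan over rows and columns that returns on the first '#' found, which is exactly the row-major last one.
import Mathlib
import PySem

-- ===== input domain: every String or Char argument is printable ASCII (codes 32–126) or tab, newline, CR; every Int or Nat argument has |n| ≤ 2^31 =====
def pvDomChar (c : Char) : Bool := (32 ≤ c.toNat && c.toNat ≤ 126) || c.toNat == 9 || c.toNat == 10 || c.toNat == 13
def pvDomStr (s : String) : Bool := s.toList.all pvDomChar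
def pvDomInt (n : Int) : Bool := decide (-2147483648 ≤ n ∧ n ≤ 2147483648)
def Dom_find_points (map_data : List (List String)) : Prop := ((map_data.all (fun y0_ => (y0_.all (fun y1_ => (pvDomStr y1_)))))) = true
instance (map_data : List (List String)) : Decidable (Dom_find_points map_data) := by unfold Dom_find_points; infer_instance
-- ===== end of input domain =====

-- B replaces A's full overwrite scan by a backward scan returning on the first '#'; return values agree everywhere.

-- ===== PORT A =====
-- A: end starts at none and is overwritten by (i, j) at every '#', over a forward double enumerate.
def find_points (map_data : List (List String)) : (Int × Int) × (Option (Int × Int)) :=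
  let start : Int × Int := (0, 0)
  let endv : Option (Int × Int) :=
    (PySem.List.enumerate map_data).foldl
      (fun e (p : Int × List String) =>
        (PySem.List.enumerate p.2).foldl
          (fun e (q : Int × String) => if q.2 == "#" then some (p.1, q.1) else e) e)
      none
  (start, endv)

-- ===== PORT B =====
-- B inner loop: first '#' in the reversed enumeration of a row (early return).
def pvAltInner (i : Int) (pairs : List (Int × String)) : Option (Int × Int) :=
  match pairs with
  | [] => none
  | (j, v) :: rest => if v == "#" then some (i, j) else pvAltInner i rest

-- B outer loop: rows in reverse; return the first row's hit, else continue.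
def pvAltOuter (rows : List (Int × List String)) : Option (Int × Int) :=
  match rows with
  | [] => none
  | (i, row) :: rest =>
    match pvAltInner i (PySem.List.enumerate row).reverse with
    | some p => some p
    | none => pvAltOuter rest

def find_points_alt (map_data : List (List String)) : (Int × Int) × (Option (Int × Int)) :=
  ((0, 0), pvAltOuter (PySem.List.enumerate map_data).reverse)

-- ===== PRECONDITION & SPEC =====
def Spec_find_points (map_data : List (List String)) (out : (Int × Int) × (Option (Int × Int))) : Prop := out = find_points_alt map_data
instance (map_data : List (List String)) (out : (Int × Int) × (Option (Int × Int))) : Decidable (Spec_find_points map_data out) := by unfold Spec_find_points; infer_instance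

-- ===== CLAIM (what is proved, stated in full; the proofs are below) =====
def Claim_equal_find_points : Prop := ∀ (map_data : List (List String)), Dom_find_points map_data → Spec_find_points map_data (find_points map_data)

-- ===== LEMMAS AND PROOFS =====

-- An overwrite fold "keep the last match" equals "first match of the reversed list", else the initial value.
theorem pv_foldl_overwrite {α β : Type} (g : α → Option β) (l : List α) (e : Option β) :
    l.foldl (fun e x => (g x).or e) e = (l.reverse.findSome? g).or e := by
  induction l generalizing e with
  | nil => simp
  | cons x l ih =>
    simp only [List.foldl_cons, List.reverse_cons, List.findSome?_append, ih]
    cases h : l.reverse.findSome? g <;> cases hx : g x <;> simp [List.findSome?, hx, Option.or]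

theorem pvAltInner_eq (i : Int) (pairs : List (Int × String)) :
    pvAltInner i pairs = pairs.findSome? (fun q => if q.2 == "#" then some (i, q.1) else none) := by
  induction pairs with
  | nil => rfl
  | cons q rest ih =>
    obtain ⟨j, v⟩ := q
    simp only [pvAltInner, ih, List.findSome?]
    by_cases h : v == "#" <;> simp [h]

theorem pvAltOuter_eq (rows : List (Int × List String)) :
    pvAltOuter rows = rows.findSome?
      (fun p => ((PySem.List.enumerate p.2).reverse.findSome?
        (fun q => if q.2 == "#" then some (p.1, q.1) else none))) := by
  induction rows with
  | nil => rfl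
  | cons p rest ih =>
    obtain ⟨i, row⟩ := p
    simp only [pvAltOuter, ih, List.findSome?, pvAltInner_eq]
    cases (PySem.List.enumerate row).reverse.findSome?
        (fun q => if q.2 == "#" then some ((i : Int), q.1) else none) <;> simp

-- A's inner fold step rewritten into the `(g x).or e` overwrite shape used by pv_foldl_overwrite.
theorem pv_inner_step (i : Int) (row : List String) (e : Option (Int × Int)) :
    (PySem.List.enumerate row).foldl
        (fun e (q : Int × String) => if q.2 == "#" then some (i, q.1) else e) e
      = (PySem.List.enumerate row).foldl
          (fun e (q : Int × String) => ((if q.2 == "#" then some (i, q.1) else none).or e)) e := by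
  apply PySem.List.foldl_congr_mem
  intro e q _
  by_cases h : q.2 == "#" <;> simp [h, Option.or]

theorem find_points_eq_alt (map_data : List (List String)) :
    find_points map_data = find_points_alt map_data := by
  simp only [find_points, find_points_alt, pvAltOuter_eq]
  congr 1
  have hinner : ∀ (e : Option (Int × Int)) (p : Int × List String),
      (PySem.List.enumerate p.2).foldl
        (fun e (q : Int × String) => if q.2 == "#" then some (p.1, q.1) else e) e
      = ((PySem.List.enumerate p.2).reverse.findSome?
            (fun q => if q.2 == "#" then some (p.1, q.1) else none)).or e := by
    intro e p
    rw [pv_inner_step]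
    exact pv_foldl_overwrite (fun q => if q.2 == "#" then some (p.1, q.1) else none)
      (PySem.List.enumerate p.2) e
  have houter :
      (PySem.List.enumerate map_data).foldl
        (fun e (p : Int × List String) =>
          (PySem.List.enumerate p.2).foldl
            (fun e (q : Int × String) => if q.2 == "#" then some (p.1, q.1) else e) e)
        none
      = (PySem.List.enumerate map_data).foldl
          (fun e (p : Int × List String) =>
            ((PySem.List.enumerate p.2).reverse.findSome?
              (fun q => if q.2 == "#" then some (p.1, q.1) else none)).or e) none := by
    apply PySem.List.foldl_congr_mem
    intro e p _
    exact hinner e p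
  rw [houter]
  refine (pv_foldl_overwrite (fun (p : Int × List String) =>
      (PySem.List.enumerate p.2).reverse.findSome?
        (fun q => if q.2 == "#" then some (p.1, q.1) else none))
      (PySem.List.enumerate map_data) none).trans ?_
  cases (PySem.List.enumerate map_data).reverse.findSome?
      (fun (p : Int × List String) => (PySem.List.enumerate p.2).reverse.findSome?
        (fun q => if q.2 == "#" then some (p.1, q.1) else none)) <;> rfl

-- ===== VERDICT (by name: the statement is the Claim_ definition above) =====
theorem find_points_spec : Claim_equal_find_points := by
  intro m _
  unfold Spec_find_points
  exact find_points_eq_alt m
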